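-- pv_equiv track=rewrite | github.com/ernanhughes/stephanie | stephanie/services/style_card_service.py | _count_moves
-- ===== SOURCE A (Python) =====
-- from typing import Any, Dict, List, Optional
--
-- def _count_moves(text: str, moves: List[str]) -> Dict[str, int]:
--     t = (text or "").lower()
--     counts = {m: 0 for m in moves}
--     def has_any(xs): return sum(1 for x in xs if x in t)
--     for m in moves:
--         if m == "analogy": counts[m] = has_any([" like ", "imagine ", "it's as if", "similar to", "resembles"])
--         elif m == "contrast": counts[m] = has_any(["however", "on the other hand", " but ", " yet ", " nevertheless ", "in contrast"])
--         elif m == "example": counts[m] = has_any(["for example", "e.g.", "such as", " like "])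
--         elif m == "steps": counts[m] = has_any([" step ", " first", " next", " then", " finally", " firstly", " secondly", " lastly"])
--         elif m == "audience_check": counts[m] = has_any(["you can think", "if you're", "let's", "you might wonder", "imagine that", "picture this"])
--     return counts
-- ===== SOURCE B (Python) =====
-- _MOVE_PHRASES = {
--     "analogy": [" like ", "imagine ", "it's as if", "similar to", "resembles"],
--     "contrast": ["however", "on the other hand", " but ", " yet ", " nevertheless ", "in contrast"],
--     "example": ["for example", "e.g.", "such as", " like "],
--     "steps": [" step ", " first", " next", " then", " finally", " firstly", " secondly", " lastly"],
--     "audience_check": ["you can think", "if you're", "let's", "you might wonder", "imagine that", "picture this"],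
-- }
--
-- _ALL_PHRASES = [
--     " like ", "imagine ", "it's as if", "similar to", "resembles",
--     "however", "on the other hand", " but ", " yet ", " nevertheless ", "in contrast",
--     "for example", "e.g.", "such as",
--     " step ", " first", " next", " then", " finally", " firstly", " secondly", " lastly",
--     "you can think", "if you're", "let's", "you might wonder", "imagine that", "picture this",
-- ]
--
-- def _count_moves(text, moves):
--     t = (text or "").lower()
--     # one text-centric scan: at each position, record which phrases start there
--     found = set()
--     for i in range(len(t)):
--         for p in _ALL_PHRASES:
--             if p not in found and t.startswith(p, i):
--                 found.add(p)
--     return {m: sum(1 for p in _MOVE_PHRASES.get(m, []) if p in found) for m in moves}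
-- ===== Notes on version B (the rewrite author's own statement) =====
-- stated objective: alternative
-- what changed: A tests each move's phrases against the text with per-phrase substring 'in' checks inside an if/elif dispatch; B instead makes one text-centric scan over the positions of the lowercased text, collecting the set of phrases that start at some position, and then reads every move's count off that found-set via a phrase table.
import Mathlib
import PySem

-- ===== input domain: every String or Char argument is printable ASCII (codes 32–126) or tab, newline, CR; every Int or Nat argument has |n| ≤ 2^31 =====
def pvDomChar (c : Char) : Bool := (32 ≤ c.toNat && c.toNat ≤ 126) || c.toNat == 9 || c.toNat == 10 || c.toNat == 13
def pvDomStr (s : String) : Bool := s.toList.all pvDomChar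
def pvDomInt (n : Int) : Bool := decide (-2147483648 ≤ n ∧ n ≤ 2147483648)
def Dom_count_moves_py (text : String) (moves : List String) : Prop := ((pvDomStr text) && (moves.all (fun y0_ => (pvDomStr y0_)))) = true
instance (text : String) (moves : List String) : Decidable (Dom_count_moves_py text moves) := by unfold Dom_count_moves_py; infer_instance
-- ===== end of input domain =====

-- B replaces A's per-move phrase-by-phrase 'in' tests by one text-centric scan: a single pass over
-- the positions of the text collects the set of phrases that start somewhere, and the per-move
-- counts are then read off that found-set (alternative decomposition; same asymptotic cost).

-- ===== PORT A =====
-- has_any(xs) = sum(1 for x in xs if x in t)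
def pvHasAny (t : String) (xs : List String) : Int :=
  ((xs.filter (fun x => PySem.Str.isIn x t)).map (fun _ => (1 : Int))).sum

def count_moves_py (text : String) (moves : List String) : List (String × Int) :=
  let t := PySem.Str.lower (if text = "" then "" else text)   -- (text or "").lower()
  let counts0 : PySem.Dict String Int :=
    moves.foldl (fun d m => d.insert m 0) (PySem.Dict.mk [])  -- {m: 0 for m in moves}
  let counts := moves.foldl (fun d m =>
    if m = "analogy" then d.insert m (pvHasAny t [" like ", "imagine ", "it's as if", "similar to", "resembles"])
    else if m = "contrast" then d.insert m (pvHasAny t ["however", "on the other hand", " but ", " yet ", " nevertheless ", "in contrast"])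
    else if m = "example" then d.insert m (pvHasAny t ["for example", "e.g.", "such as", " like "])
    else if m = "steps" then d.insert m (pvHasAny t [" step ", " first", " next", " then", " finally", " firstly", " secondly", " lastly"])
    else if m = "audience_check" then d.insert m (pvHasAny t ["you can think", "if you're", "let's", "you might wonder", "imagine that", "picture this"])
    else d) counts0
  counts.items

-- ===== PORT B =====
def pvMovePhrases : PySem.Dict String (List String) := PySem.Dict.mk
  [ ("analogy", [" like ", "imagine ", "it's as if", "similar to", "resembles"]),
    ("contrast", ["however", "on the other hand", " but ", " yet ", " nevertheless ", "in contrast"]),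
    ("example", ["for example", "e.g.", "such as", " like "]),
    ("steps", [" step ", " first", " next", " then", " finally", " firstly", " secondly", " lastly"]),
    ("audience_check", ["you can think", "if you're", "let's", "you might wonder", "imagine that", "picture this"]) ]

def pvAllPhrases : List String :=
  [ " like ", "imagine ", "it's as if", "similar to", "resembles",
    "however", "on the other hand", " but ", " yet ", " nevertheless ", "in contrast",
    "for example", "e.g.", "such as",
    " step ", " first", " next", " then", " finally", " firstly", " secondly", " lastly",
    "you can think", "if you're", "let's", "you might wonder", "imagine that", "picture this" ]

-- inner loop body: for p in _ALL_PHRASES: if p not in found and t.startswith(p, i): found.add(p)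
-- (t.startswith(p, i) with 0 ≤ i is exactly 'p is a prefix of t dropped at i')
def pvScanPos (t : List Char) (found : PySem.Set String) (i : Int) : PySem.Set String :=
  pvAllPhrases.foldl (fun f p =>
    if !PySem.Set.contains f p && PySem.Chars.startswith (t.drop i.toNat) p.toList
    then PySem.Set.add f p else f) found

-- found = set(); for i in range(len(t)): <inner loop>
def pvFound (t : List Char) : PySem.Set String :=
  (PySem.List.pyRange 0 (PySem.List.len t) 1).foldl (pvScanPos t) PySem.Set.empty

-- sum(1 for p in ps if p in found)
def pvCountFound (found : PySem.Set String) (ps : List String) : Int :=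
  ((ps.filter (fun p => PySem.Set.contains found p)).map (fun _ => (1 : Int))).sum

def count_moves_py_alt (text : String) (moves : List String) : List (String × Int) :=
  let t := PySem.Str.lower (if text = "" then "" else text)
  let found := pvFound t.toList
  (moves.foldl (fun d m => d.insert m (pvCountFound found (pvMovePhrases.getD m [])))
    (PySem.Dict.mk [])).items

-- ===== PRECONDITION & SPEC =====
def Spec_count_moves_py (text : String) (moves : List String) (out : List (String × Int)) : Prop := out = count_moves_py_alt text moves
instance (text : String) (moves : List String) (out : List (String × Int)) : Decidable (Spec_count_moves_py text moves out) := by unfold Spec_count_moves_py; infer_instance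

-- ===== CLAIM (what is proved, stated in full; the proofs are below) =====
def Claim_equal_count_moves_py : Prop := ∀ (text : String) (moves : List String), Dom_count_moves_py text moves → Spec_count_moves_py text moves (count_moves_py text moves)

-- ===== LEMMAS AND PROOFS =====

-- The value A's dispatch assigns to a known move (none = the branch does nothing).
def pvGA (t : String) : String → Option Int := fun m =>
  if m = "analogy" then some (pvHasAny t [" like ", "imagine ", "it's as if", "similar to", "resembles"])
  else if m = "contrast" then some (pvHasAny t ["however", "on the other hand", " but ", " yet ", " nevertheless ", "in contrast"])
  else if m = "example" then some (pvHasAny t ["for example", "e.g.", "such as", " like "])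
  else if m = "steps" then some (pvHasAny t [" step ", " first", " next", " then", " finally", " firstly", " secondly", " lastly"])
  else if m = "audience_check" then some (pvHasAny t ["you can think", "if you're", "let's", "you might wonder", "imagine that", "picture this"])
  else none

-- keys appended by a fold of key-determined inserts, given the keys already seen
def pvExtG (g : String → Option Int) (seen : List String) : List String → List (String × Int)
  | [] => []
  | m :: rest =>
    if m ∈ seen then pvExtG g seen rest
    else match g m with
      | none => pvExtG g seen rest
      | some v => (m, v) :: pvExtG g (m :: seen) rest

-- update of one existing pair by such a fold
def pvUpd (g : String → Option Int) (ms : List String) (p : String × Int) : String × Int :=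
  if p.1 ∈ ms then match g p.1 with | some v => (p.1, v) | none => p else p

lemma pvExtG_congr_seen (g : String → Option Int) :
    ∀ (ms s1 s2 : List String), (∀ x, x ∈ s1 ↔ x ∈ s2) → pvExtG g s1 ms = pvExtG g s2 ms := by
  intro ms
  induction ms with
  | nil => intro _ _ _; rfl
  | cons m rest ih =>
    intro s1 s2 h
    by_cases hm : m ∈ s1
    · simp [pvExtG, hm, (h m).mp hm, ih s1 s2 h]
    · have hm2 : m ∉ s2 := fun hx => hm ((h m).mpr hx)
      cases hg : g m with
      | none => simp [pvExtG, hm, hm2, hg, ih s1 s2 h]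
      | some v =>
        have h' : ∀ x, x ∈ m :: s1 ↔ x ∈ m :: s2 := by
          intro x; simp [List.mem_cons, h x]
        simp [pvExtG, hm, hm2, hg, ih (m :: s1) (m :: s2) h']

-- Master lemma: the item list produced by folding key-determined inserts.
lemma pvFold_items (g : String → Option Int)
    (step : PySem.Dict String Int → String → PySem.Dict String Int)
    (hstep : ∀ d m, step d m = match g m with | some v => d.insert m v | none => d) :
    ∀ (ms : List String) (d : PySem.Dict String Int),
      (ms.foldl step d).items = d.items.map (pvUpd g ms) ++ pvExtG g (d.items.map Prod.fst) ms := by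
  intro ms
  induction ms with
  | nil =>
    intro d
    have h : d.items.map (pvUpd g []) = d.items.map id :=
      List.map_congr_left (fun p _ => by simp [pvUpd])
    simp [pvExtG, h]
  | cons m rest ih =>
    intro d
    have hkeys : m ∈ d.items.map Prod.fst ↔ d.contains m = true := by
      simp [PySem.Dict.contains, List.any_eq_true, List.mem_map]
    rw [List.foldl_cons, hstep]
    cases hg : g m with
    | none =>
      rw [ih d]
      have hmap : d.items.map (pvUpd g rest) = d.items.map (pvUpd g (m :: rest)) := by
        apply List.map_congr_left
        intro p _
        by_cases hm : p.1 = m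
        · simp [pvUpd, hm, hg, List.mem_cons]
        · simp [pvUpd, List.mem_cons, hm]
      have hext : pvExtG g (d.items.map Prod.fst) (m :: rest)
          = pvExtG g (d.items.map Prod.fst) rest := by
        by_cases hk : m ∈ d.items.map Prod.fst <;> simp [pvExtG, hk, hg]
      rw [hmap, hext]
    | some v =>
      by_cases hc : d.contains m = true
      · -- key already present: insert replaces in place
        have hins : (d.insert m v).items
            = d.items.map (fun p => if p.1 == m then (m, v) else p) := by
          simp [PySem.Dict.insert, hc]
        rw [ih (d.insert m v), hins]
        have hkeyseq : (d.items.map (fun p => if p.1 == m then (m, v) else p)).map Prod.fst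
            = d.items.map Prod.fst := by
          rw [List.map_map]
          apply List.map_congr_left
          intro p _
          by_cases hm : p.1 = m <;> simp [hm]
        have hmap : (d.items.map (fun p => if p.1 == m then (m, v) else p)).map (pvUpd g rest)
            = d.items.map (pvUpd g (m :: rest)) := by
          rw [List.map_map]
          apply List.map_congr_left
          intro p _
          by_cases hm : p.1 = m
          · by_cases hr : m ∈ rest <;>
              simp [pvUpd, hm, hg, hr, List.mem_cons]
          · simp [pvUpd, hm, List.mem_cons]
        have hext : pvExtG g (d.items.map Prod.fst) (m :: rest)
            = pvExtG g (d.items.map Prod.fst) rest := by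
          simp [pvExtG, hkeys.mpr hc]
        rw [hkeyseq, hmap, hext]
      · -- new key: insert appends
        have hins : (d.insert m v).items = d.items ++ [(m, v)] := by
          simp [PySem.Dict.insert, hc]
        have hmk : m ∉ d.items.map Prod.fst := fun hx => hc (hkeys.mp hx)
        rw [ih (d.insert m v), hins]
        have hmap : d.items.map (pvUpd g rest) = d.items.map (pvUpd g (m :: rest)) := by
          apply List.map_congr_left
          intro p hp
          have hm : p.1 ≠ m := fun he => hmk (by exact List.mem_map.mpr ⟨p, hp, he⟩)
          simp [pvUpd, List.mem_cons, hm]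
        have hhead : pvUpd g rest (m, v) = (m, v) := by
          by_cases hr : m ∈ rest <;> simp [pvUpd, hr, hg]
        have hseen : pvExtG g (d.items.map Prod.fst ++ [m]) rest
            = pvExtG g (m :: d.items.map Prod.fst) rest := by
          apply pvExtG_congr_seen
          intro x; simp [List.mem_append, List.mem_cons, or_comm]
        have hext : pvExtG g (d.items.map Prod.fst) (m :: rest)
            = (m, v) :: pvExtG g (m :: d.items.map Prod.fst) rest := by
          simp [pvExtG, hmk, hg]
        simp only [List.map_append, List.map_cons, List.map_nil, hmap, hhead, hseen, hext]
        simp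

-- phase-1 value function of A ({m: 0}), and B's value function
def pvG0 : String → Option Int := fun _ => some 0
def pvGB (t : String) : String → Option Int :=
  fun m => some (pvCountFound (pvFound t.toList) (pvMovePhrases.getD m []))

-- membership in the found-set after the inner phrase loop at one position
lemma pvScanPos_mem (t : List Char) (i : Int) (q : String) :
    ∀ (ps : List String) (f : PySem.Set String),
      q ∈ ps.foldl (fun f p =>
        if !PySem.Set.contains f p && PySem.Chars.startswith (t.drop i.toNat) p.toList
        then PySem.Set.add f p else f) f
      ↔ q ∈ f ∨ (q ∈ ps ∧ PySem.Chars.startswith (t.drop i.toNat) q.toList = true) := by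
  intro ps
  induction ps with
  | nil => simp
  | cons p rest ih =>
    intro f
    rw [List.foldl_cons, ih]
    by_cases hpf : p ∈ f
    · have hc : PySem.Set.contains f p = true := (PySem.Set.contains_iff _ _).mpr hpf
      by_cases hq : q = p
      · subst hq; simp [hc, hpf, List.mem_cons]
      · simp [hc, hpf, List.mem_cons, hq]
    · have hc : PySem.Set.contains f p = false := by
        cases h : PySem.Set.contains f p
        · rfl
        · exact absurd ((PySem.Set.contains_iff _ _).mp h) hpf
      by_cases hs : PySem.Chars.startswith (t.drop i.toNat) p.toList = true
      · by_cases hq : q = p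
        · subst hq; simp [hc, hs, PySem.Set.mem_add, hpf, List.mem_cons]
        · simp [hc, hs, hpf, PySem.Set.mem_add, List.mem_cons, hq]
      · have hs' : PySem.Chars.startswith (t.drop i.toNat) p.toList = false := by
          cases h : PySem.Chars.startswith (t.drop i.toNat) p.toList
          · rfl
          · exact absurd h hs
        by_cases hq : q = p
        · subst hq; simp [hc, hs', List.mem_cons]
        · simp [hc, hs', List.mem_cons, hq]

-- membership in the found-set after scanning a list of positions
lemma pvScan_fold_mem (t : List Char) (q : String) :
    ∀ (is : List Int) (f : PySem.Set String),
      q ∈ is.foldl (pvScanPos t) f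
      ↔ q ∈ f ∨ (q ∈ pvAllPhrases ∧ ∃ i ∈ is, PySem.Chars.startswith (t.drop i.toNat) q.toList = true) := by
  intro is
  induction is with
  | nil => simp
  | cons i rest ih =>
    intro f
    rw [List.foldl_cons, ih, pvScanPos, pvScanPos_mem]
    constructor
    · rintro ((hf | ⟨hq, hs⟩) | ⟨hq, j, hj, hs⟩)
      · exact Or.inl hf
      · exact Or.inr ⟨hq, i, List.mem_cons_self .., hs⟩
      · exact Or.inr ⟨hq, j, List.mem_cons_of_mem _ hj, hs⟩
    · rintro (hf | ⟨hq, j, hj, hs⟩)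
      · exact Or.inl (Or.inl hf)
      · rcases List.mem_cons.mp hj with he | ht
        · exact Or.inl (Or.inr ⟨hq, he ▸ hs⟩)
        · exact Or.inr ⟨hq, j, ht, hs⟩

-- a nonempty known phrase is in the found-set iff it occurs in the text
lemma pvFound_contains (t : List Char) (q : String)
    (hq : q.toList ≠ []) (hmem : q ∈ pvAllPhrases) :
    PySem.Set.contains (pvFound t) q = PySem.Chars.isIn q.toList t := by
  rw [Bool.eq_iff_iff, PySem.Set.contains_iff]
  rw [pvFound, pvScan_fold_mem]
  rw [← PySem.Chars.exists_prefix_drop_iff_isIn]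
  simp only [PySem.Set.empty, List.not_mem_nil, false_or, PySem.List.mem_pyRange_one]
  constructor
  · rintro ⟨_, i, ⟨_, _⟩, hs⟩
    exact ⟨i.toNat, (PySem.Chars.startswith_iff _ _).mp hs⟩
  · rintro ⟨j, hpre⟩
    have hjlen : (j : Int) < PySem.List.len t := by
      rcases hpre with ⟨r, hr⟩
      have hlen : q.toList.length + r.length = (t.drop j).length := by
        rw [← hr]; simp
      have h0 : 0 < q.toList.length := List.length_pos_iff.mpr hq
      rw [List.length_drop] at hlen
      rw [PySem.List.len_eq]
      omega
    refine ⟨hmem, (j : Int), ⟨by positivity, hjlen⟩, ?_⟩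
    rw [PySem.Chars.startswith_iff]
    simpa using hpre

lemma pvFilter_congr_found (t : String) (ps : List String)
    (h : ∀ p ∈ ps, p ∈ pvAllPhrases ∧ p.toList ≠ []) :
    ps.filter (fun x => PySem.Str.isIn x t) = ps.filter (fun p => PySem.Set.contains (pvFound t.toList) p) := by
  apply List.filter_congr
  intro p hp
  rcases h p hp with ⟨hmem, hne⟩
  rw [PySem.Str.isIn_eq, ← pvFound_contains t.toList p hne hmem]

-- A's dispatch value (0 when the branch does nothing) equals B's found-set count.
lemma pvGA_compat (t : String) (m : String) :
    (pvGA t m).getD 0 = pvCountFound (pvFound t.toList) (pvMovePhrases.getD m []) := by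
  have key : ∀ ps : List String, (∀ p ∈ ps, p ∈ pvAllPhrases ∧ p.toList ≠ []) →
      pvHasAny t ps = pvCountFound (pvFound t.toList) ps := by
    intro ps h
    unfold pvHasAny pvCountFound
    rw [pvFilter_congr_found t ps h]
  by_cases h1 : m = "analogy"
  · subst h1
    simp only [pvGA, reduceIte, Option.getD_some]
    rw [key _ (by decide)]
    simp [pvMovePhrases, PySem.Dict.getD, PySem.Dict.get?]
  by_cases h2 : m = "contrast"
  · subst h2
    simp only [pvGA, String.reduceEq, reduceIte, Option.getD_some]
    rw [key _ (by decide)]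
    simp [pvMovePhrases, PySem.Dict.getD, PySem.Dict.get?]
  by_cases h3 : m = "example"
  · subst h3
    simp only [pvGA, String.reduceEq, reduceIte, Option.getD_some]
    rw [key _ (by decide)]
    simp [pvMovePhrases, PySem.Dict.getD, PySem.Dict.get?]
  by_cases h4 : m = "steps"
  · subst h4
    simp only [pvGA, String.reduceEq, reduceIte, Option.getD_some]
    rw [key _ (by decide)]
    simp [pvMovePhrases, PySem.Dict.getD, PySem.Dict.get?]
  by_cases h5 : m = "audience_check"
  · subst h5
    simp only [pvGA, String.reduceEq, reduceIte, Option.getD_some]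
    rw [key _ (by decide)]
    simp [pvMovePhrases, PySem.Dict.getD, PySem.Dict.get?]
  · simp [pvGA, pvMovePhrases, PySem.Dict.getD, PySem.Dict.get?, h1, h2, h3, h4, h5,
      Ne.symm h1, Ne.symm h2, Ne.symm h3, Ne.symm h4, Ne.symm h5, pvCountFound]

lemma pvExtG_keys_total (g : String → Option Int) (hg : ∀ m, (g m).isSome) :
    ∀ (ms seen : List String) (m : String), m ∈ ms →
      m ∈ seen ∨ m ∈ (pvExtG g seen ms).map Prod.fst := by
  intro ms
  induction ms with
  | nil => simp
  | cons m0 rest ih =>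
    intro seen m hm
    cases hv : g m0 with
    | none => exact absurd (congrArg Option.isSome hv) (by simp [hg m0])
    | some v =>
      by_cases h0 : m0 ∈ seen
      · rcases List.mem_cons.mp hm with he | ht
        · exact Or.inl (he ▸ h0)
        · simpa [pvExtG, h0] using ih seen m ht
      · rcases List.mem_cons.mp hm with he | ht
        · subst he; right; simp [pvExtG, h0, hv]
        · rcases ih (m0 :: seen) m ht with hs | hx
          · rcases List.mem_cons.mp hs with he | hs'
            · subst he; right; simp [pvExtG, h0, hv]
            · exact Or.inl hs'
          · right; simp [pvExtG, h0, hv, List.mem_cons]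
            right
            simpa using hx

lemma pvExtG_nil_of_seen (g : String → Option Int) :
    ∀ (ms seen : List String), (∀ m ∈ ms, m ∈ seen) → pvExtG g seen ms = [] := by
  intro ms
  induction ms with
  | nil => simp [pvExtG]
  | cons m rest ih =>
    intro seen h
    have hm : m ∈ seen := h m (List.mem_cons_self ..)
    simp [pvExtG, hm, ih seen (fun x hx => h x (List.mem_cons_of_mem _ hx))]

lemma pvMapUpd (t : String) (msAll : List String) :
    ∀ (ms seen : List String), (∀ x ∈ ms, x ∈ msAll) →
      (pvExtG pvG0 seen ms).map (pvUpd (pvGA t) msAll) = pvExtG (pvGB t) seen ms := by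
  intro ms
  induction ms with
  | nil => intro _ _; rfl
  | cons m rest ih =>
    intro seen h
    have hmem : m ∈ msAll := h m (List.mem_cons_self ..)
    have htail : ∀ x ∈ rest, x ∈ msAll := fun x hx => h x (List.mem_cons_of_mem _ hx)
    by_cases h0 : m ∈ seen
    · simp [pvExtG, h0, pvG0, pvGB, ih seen htail]
    · have hhead : pvUpd (pvGA t) msAll (m, 0)
          = (m, pvCountFound (pvFound t.toList) (pvMovePhrases.getD m [])) := by
        have := pvGA_compat t m
        cases hv : pvGA t m with
        | none => simp [pvUpd, hmem, hv]; simpa [hv] using this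
        | some v => simp [pvUpd, hmem, hv]; simpa [hv] using this
      simp [pvExtG, h0, pvG0, pvGB, hhead, ih (m :: seen) htail]

-- A's dispatch step written as a key-determined insert
lemma pvStepA_eq (t : String) :
    ∀ (d : PySem.Dict String Int) (m : String),
      (if m = "analogy" then d.insert m (pvHasAny t [" like ", "imagine ", "it's as if", "similar to", "resembles"])
       else if m = "contrast" then d.insert m (pvHasAny t ["however", "on the other hand", " but ", " yet ", " nevertheless ", "in contrast"])
       else if m = "example" then d.insert m (pvHasAny t ["for example", "e.g.", "such as", " like "])
       else if m = "steps" then d.insert m (pvHasAny t [" step ", " first", " next", " then", " finally", " firstly", " secondly", " lastly"])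
       else if m = "audience_check" then d.insert m (pvHasAny t ["you can think", "if you're", "let's", "you might wonder", "imagine that", "picture this"])
       else d)
      = match pvGA t m with | some v => d.insert m v | none => d := by
  intro d m
  by_cases h1 : m = "analogy"; · simp [pvGA, h1]
  by_cases h2 : m = "contrast"; · simp [pvGA, h1, h2]
  by_cases h3 : m = "example"; · simp [pvGA, h1, h2, h3]
  by_cases h4 : m = "steps"; · simp [pvGA, h1, h2, h3, h4]
  by_cases h5 : m = "audience_check"; · simp [pvGA, h1, h2, h3, h4, h5]
  simp [pvGA, h1, h2, h3, h4, h5]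

-- ===== VERDICT (by name: the statement is the Claim_ definition above) =====
theorem count_moves_py_spec : Claim_equal_count_moves_py := by
  intro text moves _
  simp only [Spec_count_moves_py, count_moves_py, count_moves_py_alt]
  set t := PySem.Str.lower (if text = "" then "" else text) with ht
  have hA := pvFold_items (pvGA t) _ (pvStepA_eq t) moves
    (moves.foldl (fun d m => d.insert m 0) (PySem.Dict.mk []))
  have h0 := pvFold_items pvG0 (fun d m => d.insert m 0) (fun _ _ => rfl) moves (PySem.Dict.mk [])
  have hB := pvFold_items (pvGB t)
    (fun d m => d.insert m (pvCountFound (pvFound t.toList) (pvMovePhrases.getD m [])))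
    (fun _ _ => rfl) moves (PySem.Dict.mk [])
  simp only [List.map_nil, List.nil_append] at h0 hB
  rw [hA, hB, h0]
  have hcov : ∀ m ∈ moves, m ∈ (pvExtG pvG0 [] moves).map Prod.fst := by
    intro m hm
    rcases pvExtG_keys_total pvG0 (fun _ => rfl) moves [] m hm with hs | hx
    · cases hs
    · exact hx
  rw [pvExtG_nil_of_seen (pvGA t) moves _ hcov, List.append_nil]
  exact pvMapUpd t moves moves [] (fun x hx => hx)
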